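-- pv_equiv track=rewrite | github.com/Scope0204/Programmers_Practice | 1단계/비밀지도_kakao.py | solution
-- ===== SOURCE A (Python) =====
-- def binary(num, n):
--     answer = []
--     while len(answer) < n:
--         if num:
--             answer.insert(0, num % 2)
--             num = num // 2
--         else:
--             answer.insert(0, 0)
--
--     return answer
--
-- def solution(n, arr1, arr2):
--     answer = ['']*n
--
--     for i in range(n):
--         a, b = binary(arr1[i], n), binary(arr2[i], n)
--         for j in range(n):
--             if a[j] == 1 or b[j] == 1:
--                 answer[i] += '#'
--             else:
--                 answer[i] += ' '
--
--     return answer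
-- ===== SOURCE B (Python) =====
-- def solution(n, arr1, arr2):
--     mask = (1 << n) - 1
--     tr = str.maketrans('01', ' #')
--     return [format((arr1[i] | arr2[i]) & mask, 'b').zfill(n).translate(tr)
--             for i in range(n)]
-- ===== Notes on version B (the rewrite author's own statement) =====
-- stated objective: faster
-- what changed: B replaces A's per-row construction of two n-bit lists (repeated insert(0) with //,%) and the per-position comparison loop by ORing the two row numbers once, masking to n bits, and rendering the row with format(.,'b').zfill(n).translate({'0':' ','1':'#'}).
-- outside the precondition, e.g. on solution(-1, [], []): A returns [], B raises ValueError
import Mathlib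
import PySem

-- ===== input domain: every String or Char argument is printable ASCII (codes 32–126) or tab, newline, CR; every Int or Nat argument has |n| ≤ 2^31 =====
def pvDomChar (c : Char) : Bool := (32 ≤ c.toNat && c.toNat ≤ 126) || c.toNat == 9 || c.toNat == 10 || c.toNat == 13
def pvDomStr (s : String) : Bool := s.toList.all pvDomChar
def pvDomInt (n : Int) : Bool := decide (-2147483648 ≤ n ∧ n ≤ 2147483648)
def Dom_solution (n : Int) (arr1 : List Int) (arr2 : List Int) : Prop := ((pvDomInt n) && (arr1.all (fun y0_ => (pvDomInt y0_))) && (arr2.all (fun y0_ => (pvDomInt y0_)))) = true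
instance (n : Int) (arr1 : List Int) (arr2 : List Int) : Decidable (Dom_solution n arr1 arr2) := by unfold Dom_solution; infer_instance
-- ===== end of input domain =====

-- B ORs the two row numbers once, masks to n bits, and renders the row via binary
-- formatting + zero-fill + character translation, instead of A's per-row bit lists
-- built by insert(0)/'//','%' and a per-position comparison loop (faster in a timing run).


-- ===== PORT A =====
-- while len(answer) < n: each iteration prepends exactly one element to 'answer', so starting
-- from [] the loop runs exactly n.toNat times; 'fuel' counts the remaining iterations.
def binaryGo (num : Int) (answer : List Int) : Nat → List Int
  | 0 => answer
  | fuel + 1 =>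
    if num ≠ 0 then
      binaryGo (PySem.Int.floordiv num 2) (PySem.Int.mod num 2 :: answer) fuel
    else
      binaryGo num (0 :: answer) fuel

def binaryA (num : Int) (n : Int) : List Int := binaryGo num [] n.toNat

-- answer = ['']*n with answer[i] fully built in iteration i of 'for i in range(n)': a map over the
-- range; the row 'answer[i] += c' is accumulated as its list of characters (String.ofList at the
-- end). arr1[i]/arr2[i] via pyGetD: the index is in range under Pre_solution.
def solution (n : Int) (arr1 : List Int) (arr2 : List Int) : List String :=
  (PySem.List.pyRange 0 n 1).map (fun i =>
    let a := binaryA (PySem.List.pyGetD arr1 i 0) n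
    let b := binaryA (PySem.List.pyGetD arr2 i 0) n
    String.ofList ((PySem.List.pyRange 0 n 1).foldl (fun cs j =>
      if PySem.List.pyGetD a j 0 = 1 ∨ PySem.List.pyGetD b j 0 = 1 then cs ++ ['#']
      else cs ++ [' ']) []))

-- ===== PORT B =====
-- format(c, 'b') for the nonnegative c that B produces: binary digits, most significant first
def natBin : Nat → List Char
  | 0 => []
  | m + 1 => natBin ((m + 1) / 2) ++ [if (m + 1) % 2 = 1 then '1' else '0']
decreasing_by exact Nat.div_lt_self (Nat.succ_pos m) Nat.one_lt_two

-- exact for 0 ≤ c (B only formats masked, hence nonnegative, values)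
def pyFormatB (c : Int) : List Char := if c = 0 then ['0'] else natBin c.toNat

-- str.zfill(w): pad with '0' on the left up to width w (unchanged if already longer)
def pyZfill (w : Nat) (s : List Char) : List Char := List.replicate (w - s.length) '0' ++ s

-- str.translate(str.maketrans('01', ' #')): '0' ↦ ' ', '1' ↦ '#', anything else unchanged
def pyTranslate01 (s : List Char) : List Char :=
  s.map (fun ch => if ch = '0' then ' ' else if ch = '1' then '#' else ch)

-- mask = (1 << n) - 1; the list comprehension is a map over range(n)
def solution_alt (n : Int) (arr1 : List Int) (arr2 : List Int) : List String :=
  let mask : Int := ((1 <<< n.toNat : Nat) : Int) - 1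
  (PySem.List.pyRange 0 n 1).map (fun i =>
    String.ofList (pyTranslate01 (pyZfill n.toNat (pyFormatB
      (PySem.Int.band (PySem.Int.bor (PySem.List.pyGetD arr1 i 0) (PySem.List.pyGetD arr2 i 0)) mask)))))

-- ===== PRECONDITION & SPEC =====
-- Python A raises IndexError when n exceeds a length; on n < 0 A returns [] (range is empty)
-- while B's '1 << n' raises ValueError, so n < 0 is excluded as well.
def Pre_solution (n : Int) (arr1 : List Int) (arr2 : List Int) : Prop :=
  0 ≤ n ∧ n ≤ (arr1.length : Int) ∧ n ≤ (arr2.length : Int)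
instance (n : Int) (arr1 : List Int) (arr2 : List Int) : Decidable (Pre_solution n arr1 arr2) := by unfold Pre_solution; infer_instance

def pvWitness_solution : Int × List Int × List Int := (2, [9, 20], [30, 1])

def Spec_solution (n : Int) (arr1 : List Int) (arr2 : List Int) (out : List String) : Prop := out = solution_alt n arr1 arr2
instance (n : Int) (arr1 : List Int) (arr2 : List Int) (out : List String) : Decidable (Spec_solution n arr1 arr2 out) := by unfold Spec_solution; infer_instance

-- ===== CLAIM (what is proved, stated in full; the proofs are below) =====
def Claim_equal_solution : Prop := ∀ (n : Int) (arr1 : List Int) (arr2 : List Int), Dom_solution n arr1 arr2 → Pre_solution n arr1 arr2 → Spec_solution n arr1 arr2 (solution n arr1 arr2)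

-- ===== LEMMAS AND PROOFS =====

-- the two branches of the while-body coincide when num = 0 (0 % 2 = 0, 0 // 2 = 0)
theorem binaryGo_step (num : Int) (answer : List Int) (fuel : Nat) :
    binaryGo num answer (fuel + 1) =
      binaryGo (PySem.Int.floordiv num 2) (PySem.Int.mod num 2 :: answer) fuel := by
  by_cases h : num = 0
  · subst h; simp [binaryGo]
  · simp [binaryGo, h]

-- (num // 2) >> t = num >> (t+1): Python // floors and >> is the floor of division by 2^t
theorem shiftRight_succ_fdiv (num : Int) (t : Nat) :
    PySem.Int.floordiv num 2 >>> t = num >>> (t + 1) := by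
  rw [PySem.Int.floordiv_eq_ediv_of_pos (by norm_num), Int.shiftRight_eq_div_pow,
      Int.shiftRight_eq_div_pow]
  rw [Int.ediv_ediv_of_nonneg]
  · norm_num [pow_succ, mul_comm]
  · norm_num

-- characterisation of A's while loop: the bits num >> t & 1, least significant last
theorem binaryGo_eq (fuel : Nat) (num : Int) (answer : List Int) :
    binaryGo num answer fuel =
      ((List.range fuel).map (fun (t : Nat) => PySem.Int.mod (num >>> t) 2)).reverse ++ answer := by
  induction fuel generalizing num answer with
  | zero => simp [binaryGo]
  | succ m ih =>
    rw [binaryGo_step, ih, List.range_succ_eq_map]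
    simp [List.map_map, Function.comp_def, Int.shiftRight_zero]
    intro a _
    rw [show num / 2 = PySem.Int.floordiv num 2 from
          (PySem.Int.floordiv_eq_ediv_of_pos (by norm_num)).symm,
        shiftRight_succ_fdiv]

-- A's row, as a map over range n of the bit at position n-1-t
theorem rowA_eq (A B n : Int) (hn : 0 < n) :
    (PySem.List.pyRange 0 n 1).foldl (fun cs j =>
      if PySem.List.pyGetD (binaryA A n) j 0 = 1 ∨ PySem.List.pyGetD (binaryA B n) j 0 = 1 then cs ++ ['#']
      else cs ++ [' ']) [] =
    (List.range n.toNat).map (fun t =>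
      if PySem.Int.mod (A >>> (n.toNat - 1 - t)) 2 = 1 ∨ PySem.Int.mod (B >>> (n.toNat - 1 - t)) 2 = 1
      then '#' else ' ') := by
  have hfun : (fun (cs : List Char) (j : Int) =>
      if PySem.List.pyGetD (binaryA A n) j 0 = 1 ∨ PySem.List.pyGetD (binaryA B n) j 0 = 1 then cs ++ ['#']
      else cs ++ [' ']) = (fun cs j => cs ++ [if PySem.List.pyGetD (binaryA A n) j 0 = 1 ∨ PySem.List.pyGetD (binaryA B n) j 0 = 1 then '#' else ' ']) := by
    funext cs j; split <;> rfl
  rw [hfun, PySem.List.foldl_append_singleton_eq_map, List.nil_append]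
  rw [PySem.List.pyRange_one]
  have hm : (n - 0).toNat = n.toNat := by omega
  rw [hm, List.map_map]
  apply List.map_congr_left
  intro t ht
  rw [List.mem_range] at ht
  have hgetD : ∀ (X : Int), PySem.List.pyGetD (binaryA X n) ((0 : Int) + ↑t) 0 = PySem.Int.mod (X >>> (n.toNat - 1 - t)) 2 := by
    intro X
    have hlist : binaryA X n = ((List.range n.toNat).map (fun (t : Nat) => PySem.Int.mod (X >>> t) 2)).reverse := by
      simpa [binaryA] using binaryGo_eq n.toNat X []
    have htm : t < ((List.range n.toNat).map (fun (t : Nat) => PySem.Int.mod (X >>> t) 2)).reverse.length := by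
      simp; omega
    rw [show ((0 : Int) + ↑t) = ((t : Nat) : Int) by omega, PySem.List.pyGetD_natCast, hlist,
        List.getD_eq_getElem _ _ htm, List.getElem_reverse]
    simp
  simp only [Function.comp_def, hgetD]

-- ↑m >> t = ↑(m >> t)
theorem shift_natCast (m t : Nat) : ((m : Int) >>> t) = ((m >>> t : Nat) : Int) := by
  rw [Int.shiftRight_eq_div_pow, Nat.shiftRight_eq_div_pow]
  exact_mod_cast rfl

-- arithmetic shift of a negative: (-m-1) >> t = -(m >> t) - 1
theorem shift_neg (m t : Nat) : ((-(m : Int) - 1) >>> t) = -((m >>> t : Nat) : Int) - 1 := by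
  induction t with
  | zero => simp [Int.shiftRight_zero]
  | succ t ih =>
    rw [show t + 1 = t + 1 from rfl, Int.shiftRight_add (-(m : Int) - 1) t 1, ih,
        Int.shiftRight_eq_div_pow, Nat.shiftRight_succ]
    have h2 : ((2 ^ 1 : Nat) : Int) = 2 := by norm_num
    rw [h2]
    omega

-- bit t of a nonnegative Python int, via Nat.testBit
theorem bit_nonneg (m t : Nat) : PySem.Int.mod ((m : Int) >>> t) 2 = 1 ↔ m.testBit t := by
  rw [shift_natCast, show ((2:Int)) = ((2:Nat):Int) from rfl, PySem.Int.mod_natCast,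
      Nat.testBit_eq_decide_div_mod_eq, ← Nat.shiftRight_eq_div_pow]
  simp only [decide_eq_true_eq]
  exact_mod_cast Iff.rfl

-- bit t of a negative Python int is the complement of the bit of m where x = -m-1
theorem bit_neg (m t : Nat) : PySem.Int.mod ((-(m : Int) - 1) >>> t) 2 = 1 ↔ ¬ m.testBit t := by
  rw [shift_neg, PySem.Int.mod_eq_emod_of_pos (by norm_num), Nat.testBit_eq_decide_div_mod_eq,
      ← Nat.shiftRight_eq_div_pow]
  simp only [decide_eq_true_eq]
  omega

-- M - (M &&& k) is the bitwise difference M \ k (the and is a sub-pattern of M's bits)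
theorem testBit_sub_and (t : Nat) : ∀ (M k : Nat),
    (M - (M &&& k)).testBit t = (M.testBit t && !(k.testBit t)) := by
  induction t with
  | zero =>
    intro M k
    have hle : M &&& k ≤ M := Nat.and_le_left
    have hmod : (M &&& k) % 2 = M % 2 &&& k % 2 := by
      have := @Nat.and_mod_two_pow M k 1
      simpa using this
    simp only [Nat.testBit_zero]
    rcases Nat.mod_two_eq_zero_or_one M with hM | hM <;>
      rcases Nat.mod_two_eq_zero_or_one k with hk | hk
    · have hy : (M &&& k) % 2 = 0 := by rw [hmod, hM, hk]; decide
      have hsub : (M - (M &&& k)) % 2 = 0 := by omega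
      rw [hM, hk, hsub]; decide
    · have hy : (M &&& k) % 2 = 0 := by rw [hmod, hM, hk]; decide
      have hsub : (M - (M &&& k)) % 2 = 0 := by omega
      rw [hM, hk, hsub]; decide
    · have hy : (M &&& k) % 2 = 0 := by rw [hmod, hM, hk]; decide
      have hsub : (M - (M &&& k)) % 2 = 1 := by omega
      rw [hM, hk, hsub]; decide
    · have hy : (M &&& k) % 2 = 1 := by rw [hmod, hM, hk]; decide
      have hsub : (M - (M &&& k)) % 2 = 0 := by omega
      rw [hM, hk, hsub]; decide
  | succ t ih =>
    intro M k
    have hle : M &&& k ≤ M := Nat.and_le_left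
    have hmod : (M &&& k) % 2 = M % 2 &&& k % 2 := by
      have := @Nat.and_mod_two_pow M k 1
      simpa using this
    have hmodle : (M &&& k) % 2 ≤ M % 2 := by
      rw [hmod]; exact Nat.and_le_left
    have hdiv : (M - (M &&& k)) / 2 = M / 2 - (M &&& k) / 2 := by omega
    rw [Nat.testBit_add_one, Nat.testBit_add_one, Nat.testBit_add_one, hdiv, Nat.and_div_two, ih]

-- the four sign cases of Python's | and & (PySem.Int.bor/band), in Nat form
theorem bor_pos_neg (A K : Nat) :
    PySem.Int.bor (A : Int) (-(K : Int) - 1) = -(((K - (K &&& A)) : Nat) : Int) - 1 := by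
  simp only [PySem.Int.bor, if_pos (show (0:Int) ≤ (A:Int) by positivity),
    if_neg (show ¬ (0:Int) ≤ -(K:Int) - 1 by omega)]
  rw [show (-(-(K:Int) - 1) - 1) = (K : Int) by ring]
  simp [Int.toNat_natCast]

theorem bor_neg_pos (K B : Nat) :
    PySem.Int.bor (-(K : Int) - 1) (B : Int) = -(((K - (K &&& B)) : Nat) : Int) - 1 := by
  simp only [PySem.Int.bor, if_neg (show ¬ (0:Int) ≤ -(K:Int) - 1 by omega),
    if_pos (show (0:Int) ≤ (B:Int) by positivity)]
  rw [show (-(-(K:Int) - 1) - 1) = (K : Int) by ring]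
  simp [Int.toNat_natCast]

theorem bor_neg_neg (K L : Nat) :
    PySem.Int.bor (-(K : Int) - 1) (-(L : Int) - 1) = -(((K &&& L) : Nat) : Int) - 1 := by
  simp only [PySem.Int.bor, if_neg (show ¬ (0:Int) ≤ -(K:Int) - 1 by omega),
    if_neg (show ¬ (0:Int) ≤ -(L:Int) - 1 by omega)]
  rw [show (-(-(K:Int) - 1) - 1) = (K : Int) by ring,
      show (-(-(L:Int) - 1) - 1) = (L : Int) by ring]
  simp [Int.toNat_natCast]

theorem band_neg_pos (K B : Nat) :
    PySem.Int.band (-(K : Int) - 1) (B : Int) = (((B - (B &&& K)) : Nat) : Int) := by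
  simp only [PySem.Int.band, if_neg (show ¬ (0:Int) ≤ -(K:Int) - 1 by omega),
    if_pos (show (0:Int) ≤ (B:Int) by positivity)]
  rw [show (-(-(K:Int) - 1) - 1) = (K : Int) by ring]
  simp [Int.toNat_natCast]

-- Python's x | y, bit by bit, including negative operands (infinite two's complement)
theorem bit_bor (a b : Int) (t : Nat) :
    PySem.Int.mod (PySem.Int.bor a b >>> t) 2 = 1 ↔
      (PySem.Int.mod (a >>> t) 2 = 1 ∨ PySem.Int.mod (b >>> t) 2 = 1) := by
  rcases le_or_gt 0 a with ha | ha <;> rcases le_or_gt 0 b with hb | hb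
  · have h1 : a = ((a.toNat : Nat) : Int) := by omega
    have h2 : b = ((b.toNat : Nat) : Int) := by omega
    rw [h1, h2, PySem.Int.bor_of_nonneg (by omega) (by omega)]
    simp only [Int.toNat_natCast, bit_nonneg, Nat.testBit_or]
    simp
  · have h1 : a = ((a.toNat : Nat) : Int) := by omega
    have h2 : b = -(((-b - 1).toNat : Nat) : Int) - 1 := by omega
    rw [h1, h2, bor_pos_neg]
    simp only [bit_nonneg, bit_neg, testBit_sub_and]
    cases Nat.testBit a.toNat t <;> cases Nat.testBit (-b - 1).toNat t <;> simp
  · have h1 : a = -(((-a - 1).toNat : Nat) : Int) - 1 := by omega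
    have h2 : b = ((b.toNat : Nat) : Int) := by omega
    rw [h1, h2, bor_neg_pos]
    simp only [bit_nonneg, bit_neg, testBit_sub_and]
    cases Nat.testBit b.toNat t <;> cases Nat.testBit (-a - 1).toNat t <;> simp
  · have h1 : a = -(((-a - 1).toNat : Nat) : Int) - 1 := by omega
    have h2 : b = -(((-b - 1).toNat : Nat) : Int) - 1 := by omega
    rw [h1, h2, bor_neg_neg]
    simp only [bit_neg, Nat.testBit_and]
    cases Nat.testBit (-a - 1).toNat t <;> cases Nat.testBit (-b - 1).toNat t <;> simp

-- x & ((1 << N) - 1): a nonnegative value below 2^N whose low N bits are x's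
theorem band_mask_spec (x : Int) (N : Nat) :
    0 ≤ PySem.Int.band x (((1 <<< N : Nat) : Int) - 1) ∧
    (PySem.Int.band x (((1 <<< N : Nat) : Int) - 1)).toNat < 2 ^ N ∧
    ∀ t, t < N →
      ((PySem.Int.band x (((1 <<< N : Nat) : Int) - 1)).toNat.testBit t = true ↔
        PySem.Int.mod (x >>> t) 2 = 1) := by
  have hsl : (1 <<< N : Nat) = 2 ^ N := Nat.one_shiftLeft N
  have hmask : (((1 <<< N : Nat) : Int) - 1) = (((2 ^ N - 1 : Nat) : Nat) : Int) := by
    rw [hsl]; push_cast [Nat.one_le_two_pow]; ring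
  rcases le_or_gt 0 x with hx | hx
  · have h1 : x = ((x.toNat : Nat) : Int) := by omega
    rw [hmask, h1, PySem.Int.band_of_nonneg (by omega) (by omega)]
    simp only [Int.toNat_natCast]
    refine ⟨by positivity, ?_, ?_⟩
    · rw [Nat.and_two_pow_sub_one_eq_mod]
      exact Nat.mod_lt _ (Nat.two_pow_pos N)
    · intro t ht
      rw [bit_nonneg (x.toNat) t, Nat.testBit_and, Nat.testBit_two_pow_sub_one]
      simp [ht]
  · have h1 : x = -(((-x - 1).toNat : Nat) : Int) - 1 := by omega
    have hval : PySem.Int.band x (((1 <<< N : Nat) : Int) - 1)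
        = ((((2 ^ N - 1) - ((2 ^ N - 1) &&& (-x - 1).toNat)) : Nat) : Int) := by
      rw [hmask]
      conv_lhs => rw [h1]
      exact band_neg_pos _ _
    rw [hval]
    simp only [Int.toNat_natCast]
    refine ⟨by positivity, by have := Nat.one_le_two_pow (n := N); omega, ?_⟩
    intro t ht
    conv_rhs => rw [h1]
    rw [bit_neg, testBit_sub_and, Nat.testBit_two_pow_sub_one]
    simp [ht]

-- recursion equation of natBin for positive input
theorem natBin_pos (m : Nat) (hm : 0 < m) :
    natBin m = natBin (m / 2) ++ [if m % 2 = 1 then '1' else '0'] := by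
  obtain ⟨m', rfl⟩ : ∃ m', m = m' + 1 := ⟨m - 1, by omega⟩
  rw [natBin]

-- zero-filled binary digits of m < 2^k are exactly the k bits of m, most significant first
theorem zfill_natBin (k : Nat) : ∀ m : Nat, 0 < m → m < 2 ^ k →
    List.replicate (k - (natBin m).length) '0' ++ natBin m =
      (List.range k).map (fun j => if (m >>> (k - 1 - j)) % 2 = 1 then '1' else '0') := by
  induction k with
  | zero => intro m hm hlt; omega
  | succ k ih =>
    intro m hm hlt
    rw [natBin_pos m hm]
    have hrange : (List.range (k+1)).map (fun j => if (m >>> (k + 1 - 1 - j)) % 2 = 1 then '1' else '0') =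
        (List.range k).map (fun j => if ((m / 2) >>> (k - 1 - j)) % 2 = 1 then '1' else '0')
          ++ [if m % 2 = 1 then '1' else '0'] := by
      rw [List.range_succ, List.map_append, List.map_singleton]
      congr 1
      · apply List.map_congr_left
        intro j hj
        rw [List.mem_range] at hj
        congr 2
        rw [Nat.shiftRight_eq_div_pow, Nat.shiftRight_eq_div_pow, Nat.div_div_eq_div_mul]
        have hexp : (2:Nat) ^ (k + 1 - 1 - j) = 2 * 2 ^ (k - 1 - j) := by
          rw [show k + 1 - 1 - j = (k - 1 - j) + 1 by omega, pow_succ]; ring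
        rw [hexp]
      · congr 2
        simp [Nat.shiftRight_eq_div_pow]
    rw [hrange]
    rcases Nat.eq_zero_or_pos (m / 2) with h0 | hpos
    · rw [h0]
      have hb0 : natBin 0 = [] := by simp [natBin]
      rw [hb0]
      have hz : ∀ j ∈ List.range k, (fun j => if ((0:Nat) >>> (k - 1 - j)) % 2 = 1 then '1' else '0') j = '0' := by
        intro j hj
        simp [Nat.shiftRight_eq_div_pow]
      rw [List.map_congr_left hz]
      have hrep : (List.range k).map (fun _ => '0') = List.replicate k '0' := by
        simp [List.map_const']
      rw [hrep]
      simp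
    · have hlen : (natBin (m/2) ++ [if m % 2 = 1 then '1' else '0']).length = (natBin (m/2)).length + 1 := by
        simp
      rw [hlen, ← List.append_assoc]
      congr 1
      have hsub : k + 1 - ((natBin (m/2)).length + 1) = k - (natBin (m/2)).length := by omega
      rw [hsub]
      exact ih (m/2) hpos (by omega)

-- B's row equals A's row rendered bit by bit
theorem rowB_eq (a b n : Int) (hn : 0 < n) :
    pyTranslate01 (pyZfill n.toNat (pyFormatB
        (PySem.Int.band (PySem.Int.bor a b) (((1 <<< n.toNat : Nat) : Int) - 1)))) =
    (List.range n.toNat).map (fun t =>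
      if PySem.Int.mod (a >>> (n.toNat - 1 - t)) 2 = 1 ∨ PySem.Int.mod (b >>> (n.toNat - 1 - t)) 2 = 1
      then '#' else ' ') := by
  set N := n.toNat with hN
  have hNpos : 0 < N := by omega
  obtain ⟨hc0, hclt, hcbit⟩ := band_mask_spec (PySem.Int.bor a b) N
  set c := PySem.Int.band (PySem.Int.bor a b) (((1 <<< N : Nat) : Int) - 1) with hc
  have key : pyZfill N (pyFormatB c) =
      (List.range N).map (fun j => if (c.toNat >>> (N - 1 - j)) % 2 = 1 then '1' else '0') := by
    by_cases hzero : c = 0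
    · rw [pyFormatB, if_pos hzero]
      have hct : c.toNat = 0 := by omega
      have hz : ∀ j ∈ List.range N, (fun j => if (c.toNat >>> (N - 1 - j)) % 2 = 1 then '1' else '0') j = '0' := by
        intro j hj
        rw [hct]
        simp [Nat.shiftRight_eq_div_pow, Nat.zero_div]
      rw [List.map_congr_left hz]
      have : (List.range N).map (fun _ => '0') = List.replicate N '0' := by
        simp [List.map_const']
      rw [this, pyZfill]
      simp only [List.length_cons, List.length_nil]
      conv_rhs => rw [show N = (N - 1) + 1 by omega, List.replicate_succ']
    · rw [pyFormatB, if_neg hzero, pyZfill]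
      exact zfill_natBin N c.toNat (by omega) hclt
  rw [key, pyTranslate01, List.map_map]
  apply List.map_congr_left
  intro t ht
  rw [List.mem_range] at ht
  have hbit := hcbit (N - 1 - t) (by omega)
  simp only [Function.comp_def]
  have htb : c.toNat.testBit (N - 1 - t) = decide (c.toNat / 2 ^ (N - 1 - t) % 2 = 1) :=
    Nat.testBit_eq_decide_div_mod_eq
  rw [Nat.shiftRight_eq_div_pow]
  have hor := bit_bor a b (N - 1 - t)
  by_cases h : c.toNat / 2 ^ (N - 1 - t) % 2 = 1
  · have hcond : PySem.Int.mod (a >>> (N - 1 - t)) 2 = 1 ∨ PySem.Int.mod (b >>> (N - 1 - t)) 2 = 1 := by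
      rw [← hor, ← hbit, htb]; exact decide_eq_true h
    rw [if_pos h, if_pos hcond]
    rfl
  · have hb' : ¬ (PySem.Int.mod (a >>> (N - 1 - t)) 2 = 1 ∨ PySem.Int.mod (b >>> (N - 1 - t)) 2 = 1) := by
      rw [← hor, ← hbit, htb]
      simp [h]
    rw [if_neg h, if_neg hb']
    rfl
-- ===== VERDICT (by name: the statement is the Claim_ definition above) =====
theorem solution_spec : Claim_equal_solution := by
  unfold Claim_equal_solution Spec_solution
  intro n arr1 arr2 _ _
  simp only [solution, solution_alt]
  apply List.map_congr_left
  intro i hi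
  have hi' := (PySem.List.mem_pyRange_one).mp hi
  have hn : 0 < n := by omega
  congr 1
  rw [rowA_eq _ _ n hn, ← rowB_eq _ _ n hn]
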